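-- pv_equiv track=rewrite | github.com/puxlit/sandbox | 9/mirage_maintenance.py | parse_oasis_report
-- ===== SOURCE A (Python) =====
-- from collections.abc import Iterable
--
-- def parse_oasis_report(lines: Iterable[str]) -> tuple[tuple[int, ...], ...]:
--     """
--     >>> parse_oasis_report([
--     ...     '0 3 6 9 12 15',
--     ...     '1 3 6 10 15 21',
--     ...     '10 13 16 21 30 45',
--     ... ])
--     ((0, 3, 6, 9, 12, 15), (1, 3, 6, 10, 15, 21), (10, 13, 16, 21, 30, 45))
--     """
--     history_length = None
--     histories: list[tuple[int, ...]] = []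
--     for line in lines:
--         history = tuple(int(value) for value in line.split())
--         if history_length is not None:
--             if len(history) != history_length:
--                 raise ValueError(f'Parsed history with {len(history)} value(s) '
--                                  f'instead of expected {history_length} value(s)')
--         else:
--             history_length = len(history)
--         histories.append(history)
--     return tuple(histories)
-- ===== SOURCE B (Python) =====
-- def parse_oasis_report(lines):
--     # Tokenize once, validate the shape, then parse a single flat token
--     # stream and reshape it back into rows by the recorded widths.
--     tokenized = [line.split() for line in lines]
--     widths = [len(tokens) for tokens in tokenized]
--     for width in widths[1:]:
--         if width != widths[0]:
--             raise ValueError(f'Parsed history with {width} value(s) '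
--                              f'instead of expected {widths[0]} value(s)')
--     flat = [int(value) for tokens in tokenized for value in tokens]
--     histories = []
--     pos = 0
--     for width in widths:
--         histories.append(tuple(flat[pos:pos + width]))
--         pos += width
--     return tuple(histories)
-- ===== Notes on version B (the rewrite author's own statement) =====
-- stated objective: alternative
-- what changed: Instead of parsing each line into its own tuple inside one stateful loop, B tokenizes all lines, validates the recorded widths up front, parses one flat token stream, and reshapes it back into tuples by slicing at the recorded widths.
import Mathlib
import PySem

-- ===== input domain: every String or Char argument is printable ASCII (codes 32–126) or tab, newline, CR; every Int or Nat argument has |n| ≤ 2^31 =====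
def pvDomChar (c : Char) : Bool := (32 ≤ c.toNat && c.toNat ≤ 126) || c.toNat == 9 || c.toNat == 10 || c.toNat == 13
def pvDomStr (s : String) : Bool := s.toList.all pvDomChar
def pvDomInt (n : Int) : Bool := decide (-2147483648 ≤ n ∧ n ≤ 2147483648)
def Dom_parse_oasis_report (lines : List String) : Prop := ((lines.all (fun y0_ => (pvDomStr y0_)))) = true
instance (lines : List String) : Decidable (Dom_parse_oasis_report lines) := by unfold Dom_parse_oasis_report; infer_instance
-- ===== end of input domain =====

-- B replaces A's stateful per-line parse-and-check loop by: tokenize all lines,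
-- validate widths up front, parse ONE flat token stream, and reshape it back into
-- rows by slicing at the recorded widths.

-- int(value), defined under Pre_ (every token parses)
def pvTok (v : String) : Int := (PySem.Int.ofStr? v).getD 0

-- tuple(int(value) for value in line.split()), the parsed row
def pvParseLine (line : String) : List Int := (PySem.Str.split₀ line).map pvTok

-- ===== PORT A =====
-- A's loop: state (history_length : Option ℕ, histories); the mismatch branch raises (outside Pre_)
def parse_oasis_report (lines : List String) : List (List Int) :=
  (lines.foldl
    (fun (st : Option Nat × List (List Int)) line =>
      let history := pvParseLine line
      match st.1 with
      | some _ => (st.1, st.2 ++ [history])      -- mismatch would raise ValueError: excluded by Pre_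
      | none => (some history.length, st.2 ++ [history]))
    (none, [])).2

-- ===== PORT B =====
def parse_oasis_report_alt (lines : List String) : List (List Int) :=
  let tokenized := lines.map PySem.Str.split₀
  let widths := tokenized.map List.length
  -- width-validation loop only raises ValueError; excluded by Pre_
  let flat := tokenized.flatMap (fun t => t.map pvTok)
  (widths.foldl
    (fun (st : Int × List (List Int)) (w : Nat) =>
      (st.1 + (w : Int), st.2 ++ [PySem.List.slice flat (some st.1) (some (st.1 + (w : Int)))]))
    (0, [])).2

-- ===== PRECONDITION & SPEC =====
-- Pre_ excludes exactly the inputs where A raises ValueError: a token int() rejects,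
-- or a line whose token count differs from the first line's.
def Pre_parse_oasis_report (lines : List String) : Prop :=
  (lines.all (fun l => (PySem.Str.split₀ l).all (fun v => (PySem.Int.ofStr? v).isSome))) = true ∧
  ((match lines with
    | [] => true
    | l0 :: rest =>
      rest.all (fun l => (PySem.Str.split₀ l).length == (PySem.Str.split₀ l0).length)) = true)
instance (lines : List String) : Decidable (Pre_parse_oasis_report lines) := by
  unfold Pre_parse_oasis_report; infer_instance

def pvWitness_parse_oasis_report : List String := ["0 3 6 9", "1 3 6 10", "10 13 16 21"]

def Spec_parse_oasis_report (lines : List String) (out : List (List Int)) : Prop := out = parse_oasis_report_alt lines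
instance (lines : List String) (out : List (List Int)) : Decidable (Spec_parse_oasis_report lines out) := by unfold Spec_parse_oasis_report; infer_instance

-- ===== CLAIM (what is proved, stated in full; the proofs are below) =====
def Claim_equal_parse_oasis_report : Prop := ∀ (lines : List String), Dom_parse_oasis_report lines → Pre_parse_oasis_report lines → Spec_parse_oasis_report lines (parse_oasis_report lines)

-- ===== LEMMAS AND PROOFS =====

-- A's fold appends one parsed history per line regardless of the state's first component
theorem parse_oasis_fold (lines : List String) :
    ∀ (st : Option Nat) (acc : List (List Int)),
    (lines.foldl
      (fun (st : Option Nat × List (List Int)) line =>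
        let history := pvParseLine line
        match st.1 with
        | some _ => (st.1, st.2 ++ [history])
        | none => (some history.length, st.2 ++ [history]))
      (st, acc)).2 = acc ++ lines.map pvParseLine := by
  induction lines with
  | nil => intro st acc; simp
  | cons l rest ih =>
    intro st acc
    cases st <;> simp [List.foldl_cons, ih]

-- slicing a flat concatenation at the recorded lengths reshapes it back into the rows
theorem reshape_fold (flat : List Int) :
    ∀ (hs : List (List Int)) (pre : List Int) (acc : List (List Int)),
    flat = pre ++ hs.flatten →
    ((hs.map List.length).foldl
      (fun (st : Int × List (List Int)) (w : Nat) =>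
        (st.1 + (w : Int), st.2 ++ [PySem.List.slice flat (some st.1) (some (st.1 + (w : Int)))]))
      ((pre.length : Int), acc)).2 = acc ++ hs := by
  intro hs
  induction hs with
  | nil => intro pre acc _; simp
  | cons h t ih =>
    intro pre acc hflat
    simp only [List.map_cons, List.foldl_cons]
    rw [show ((pre.length : Int) + (h.length : Int)) = (((pre.length + h.length : Nat)) : Int) by push_cast; ring]
    rw [PySem.List.slice_natCast]
    have hdrop : flat.drop pre.length = h ++ t.flatten := by
      simp [hflat]
    have hslice : (flat.drop pre.length).take (pre.length + h.length - pre.length) = h := by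
      simp [hdrop]
    rw [hslice]
    have := ih (pre ++ h) (acc ++ [h]) (by simp [hflat])
    simpa using this

-- the flat token stream is the concatenation of the parsed rows
theorem flat_eq (lines : List String) :
    (lines.map PySem.Str.split₀).flatMap (fun t => t.map pvTok)
      = [] ++ (lines.map pvParseLine).flatten := by
  induction lines with
  | nil => rfl
  | cons l rest ih => simp [pvParseLine, ih]

-- ===== VERDICT (by name: the statement is the Claim_ definition above) =====
theorem parse_oasis_report_spec : Claim_equal_parse_oasis_report := by
  intro lines _ _
  unfold Spec_parse_oasis_report parse_oasis_report parse_oasis_report_alt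
  rw [parse_oasis_fold lines none []]
  symm
  show (((lines.map PySem.Str.split₀).map List.length).foldl
      (fun (st : Int × List (List Int)) (w : Nat) =>
        (st.1 + (w : Int), st.2 ++ [PySem.List.slice
          ((lines.map PySem.Str.split₀).flatMap (fun t => t.map pvTok))
          (some st.1) (some (st.1 + (w : Int)))]))
      (0, [])).2 = _
  rw [show ((lines.map PySem.Str.split₀).map List.length)
        = ((lines.map pvParseLine).map List.length) by
      simp [pvParseLine]]
  have h := reshape_fold
    ((lines.map PySem.Str.split₀).flatMap (fun t => t.map pvTok))
    (lines.map pvParseLine) [] []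
    (flat_eq lines)
  simpa using h
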